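-- pv_equiv track=rewrite | github.com/alikhalilli/Algorithms | Arrays/Rotation/MaxHammingDistance.py | getMaxHammingDistance
-- ===== SOURCE A (Python) =====
-- def getMaxHammingDistance(arr):
--     n = len(arr)
--     maxDistance = 0
--     for i in range(1, n):
--         currDistance = 0
--         k = 0
--         for j in range(i, i+n):
--             if arr[j % n] != arr[k]:
--                 currDistance += 1
--             k += 1
--         maxDistance = max(maxDistance, currDistance)
--     return maxDistance
-- ===== SOURCE B (Python) =====
-- def getMaxHammingDistance(arr):
--     n = len(arr)
--     if n <= 1:
--         return 0
--     positions = {}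
--     for i, v in enumerate(arr):
--         positions.setdefault(v, []).append(i)
--     matches = [0] * n
--     for ps in positions.values():
--         for p in ps:
--             for q in ps:
--                 matches[(q - p) % n] += 1
--     best = 0
--     for s in range(1, n):
--         best = max(best, n - matches[s])
--     return best
-- ===== Notes on version B (the rewrite author's own statement) =====
-- stated objective: alternative
-- what changed: Instead of recomputing the Hamming distance for every rotation with a nested index scan, B groups indices by value once, counts per-shift agreements matches[(q-p)%n] over ordered pairs within each group, and returns max over s of n - matches[s].
import Mathlib
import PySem

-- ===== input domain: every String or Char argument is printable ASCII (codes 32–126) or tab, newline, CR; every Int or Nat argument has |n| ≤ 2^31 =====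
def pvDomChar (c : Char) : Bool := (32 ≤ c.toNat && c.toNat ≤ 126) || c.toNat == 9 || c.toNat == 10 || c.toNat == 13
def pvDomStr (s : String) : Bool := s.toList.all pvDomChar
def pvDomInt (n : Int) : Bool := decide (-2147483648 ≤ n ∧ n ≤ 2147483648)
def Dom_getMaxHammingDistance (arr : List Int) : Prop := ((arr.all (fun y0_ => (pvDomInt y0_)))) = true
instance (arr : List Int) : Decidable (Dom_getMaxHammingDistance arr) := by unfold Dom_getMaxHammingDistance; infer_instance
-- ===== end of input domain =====

-- B replaces A's per-rotation rescan by a value-grouped count of per-shift agreements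
-- matches[(q-p)%n], returning max over s of n - matches[s] (an alternative algorithm, same worst-case cost).

-- ===== PORT A =====
def getMaxHammingDistance (arr : List Int) : Int :=
  let n : Int := arr.length
  -- for i in range(1, n): inner loop state is (currDistance, k); all indices are in range
  (PySem.List.pyRange 1 n 1).foldl
    (fun maxDistance i =>
      let r :=
        (PySem.List.pyRange i (i + n) 1).foldl
          (fun (st : Int × Int) j =>
            (if PySem.List.pyGetD arr (PySem.Int.mod j n) 0 ≠ PySem.List.pyGetD arr st.2 0
             then st.1 + 1 else st.1, st.2 + 1))
          (0, 0)
      max maxDistance r.1)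
    0

-- ===== PORT B =====
-- matches[i] += 1 ; the index i is always 0 ≤ i < len m here, so set/getD are exact
def pvBump (m : List Int) (i : Int) : List Int :=
  m.set i.toNat (PySem.List.pyGetD m i 0 + 1)

def getMaxHammingDistance_alt (arr : List Int) : Int :=
  let n : Int := arr.length
  if n ≤ 1 then 0
  else
    -- positions.setdefault(v, []).append(i)  ==  positions[v] = positions.get(v, []) + [i]
    let positions : PySem.Dict Int (List Int) :=
      (PySem.List.enumerate arr).foldl
        (fun d p => d.modify p.2 [] (fun l => l ++ [p.1])) PySem.Dict.empty
    let pvMatches : List Int :=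
      positions.values.foldl
        (fun m ps =>
          ps.foldl (fun m p =>
            ps.foldl (fun m q => pvBump m (PySem.Int.mod (q - p) n)) m) m)
        (List.replicate arr.length 0)
    (PySem.List.pyRange 1 n 1).foldl
      (fun best s => max best (n - PySem.List.pyGetD pvMatches s 0)) 0

-- ===== PRECONDITION & SPEC =====
def Spec_getMaxHammingDistance (arr : List Int) (out : Int) : Prop := out = getMaxHammingDistance_alt arr
instance (arr : List Int) (out : Int) : Decidable (Spec_getMaxHammingDistance arr out) := by unfold Spec_getMaxHammingDistance; infer_instance

-- ===== CLAIM (what is proved, stated in full; the proofs are below) =====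
def Claim_equal_getMaxHammingDistance : Prop := ∀ (arr : List Int), Dom_getMaxHammingDistance arr → Spec_getMaxHammingDistance arr (getMaxHammingDistance arr)

-- ===== LEMMAS AND PROOFS =====

-- arr[i] as B reads it (index always in range where used)
def pvGet (arr : List Int) (i : Int) : Int := PySem.List.pyGetD arr i 0

-- the position list B's dict stores for value v
def pvPos (arr : List Int) (v : Int) : List Int :=
  ((PySem.List.enumerate arr).filter (fun p => p.2 == v)).map (fun x => x.1)

-- the flat list of all bumped indices of B's matches loop
def pvI (arr : List Int) : List Int :=
  (PySem.Set.ofList arr).flatMap (fun v =>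
    (pvPos arr v).flatMap (fun p =>
      (pvPos arr v).map (fun q => PySem.Int.mod (q - p) (arr.length : Int))))

-- number of positions t where arr agrees with its rotation by c
def pvMatchCount (arr : List Int) (c : Int) : Nat :=
  (List.range arr.length).countP
    (fun (t : Nat) => pvGet arr (PySem.Int.mod (c + (t : Int)) (arr.length : Int)) == pvGet arr (t : Int))

lemma pvSumIte {α : Type} (l : List α) (p : α → Bool) :
    (l.map (fun a => if p a then 1 else 0)).sum = l.countP p := by
  induction l with
  | nil => rfl
  | cons x t ih => simp [List.countP_cons, ih]; split <;> simp [Nat.add_comm]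

lemma pvPos_getD (arr : List Int) (v : Int) :
    ((PySem.List.enumerate arr).foldl
        (fun d p => d.modify p.2 [] (fun l => l ++ [p.1])) PySem.Dict.empty).getD v []
    = pvPos arr v := by
  have h1 : ((PySem.List.enumerate arr).foldl
        (fun d p => d.modify p.2 [] (fun l => l ++ [p.1])) PySem.Dict.empty)
      = (((PySem.List.enumerate arr).map Prod.swap).foldl
        (fun d p => d.modify p.1 [] (fun l => l ++ [p.2])) PySem.Dict.empty) := by
    rw [List.foldl_map]; simp
  rw [h1, PySem.Dict.getD_foldl_modify_append]
  simp [pvPos, List.filter_map, Function.comp_def]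

lemma pvKeysNodup (arr : List Int) : ((PySem.List.enumerate arr).foldl
      (fun d p => d.modify p.2 [] (fun l => l ++ [p.1])) PySem.Dict.empty).keys.Nodup := by
  exact PySem.Dict.nodup_keys_foldl_modify_key (PySem.List.enumerate arr)
    (fun (p : Int × Int) => p.2) []
    (fun (d : PySem.Dict Int (List Int)) (p : Int × Int) => fun (l : List Int) => l ++ [p.1])
    PySem.Dict.empty PySem.Dict.nodup_keys_empty

lemma pvValues (arr : List Int) :
    ((PySem.List.enumerate arr).foldl
        (fun d p => d.modify p.2 [] (fun l => l ++ [p.1])) PySem.Dict.empty).values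
    = (PySem.Set.ofList arr).map (pvPos arr) := by
  have hk : ((PySem.List.enumerate arr).foldl
      (fun d p => d.modify p.2 [] (fun l => l ++ [p.1])) PySem.Dict.empty).keys
      = PySem.Set.ofList arr := by
    rw [PySem.Dict.keys_foldl_modify_key (PySem.List.enumerate arr)
      (fun (p : Int × Int) => p.2) []
      (fun (d : PySem.Dict Int (List Int)) (p : Int × Int) => fun (l : List Int) => l ++ [p.1])
      PySem.Dict.empty]
    rw [PySem.Dict.keys_empty, PySem.List.map_snd_enumerate]
    rfl
  rw [PySem.Dict.values_eq_map_keys _ (pvKeysNodup arr) [], hk]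
  exact List.map_congr_left (fun v _ => pvPos_getD arr v)

lemma mem_pvPos (arr : List Int) (v q : Int) :
    q ∈ pvPos arr v ↔ 0 ≤ q ∧ q < (arr.length : Int) ∧ pvGet arr q = v := by
  unfold pvPos
  simp only [List.mem_map, List.mem_filter, PySem.List.mem_enumerate_iff]
  constructor
  · rintro ⟨⟨a, b⟩, ⟨⟨k, hk, hab⟩, hb⟩, hq⟩
    simp only [Prod.mk.injEq] at hab
    obtain ⟨ha, hb'⟩ := hab
    simp only at hq hb
    subst hq; subst ha; subst hb'
    refine ⟨by omega, by omega, ?_⟩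
    rw [pvGet, PySem.List.pyGetD_eq_getElem arr 0 (by omega) (by omega)]
    simp only [beq_iff_eq] at hb
    simpa using hb
  · rintro ⟨h0, hn, hv⟩
    rw [pvGet, PySem.List.pyGetD_eq_getElem arr 0 h0 hn] at hv
    refine ⟨(q, v), ⟨⟨q.toNat, by omega, ?_⟩, by simp⟩, rfl⟩
    simp only [Prod.mk.injEq]
    exact ⟨by omega, hv.symm⟩

lemma nodup_pvPos (arr : List Int) (v : Int) : (pvPos arr v).Nodup := by
  have hsub : (pvPos arr v).Sublist ((PySem.List.enumerate arr).map (fun x => x.1)) :=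
    List.Sublist.map _ List.filter_sublist
  refine hsub.nodup ?_
  rw [PySem.List.map_fst_enumerate]
  exact PySem.List.nodup_pyRange_one _ _

lemma perm_pvPos (arr : List Int) :
    ((PySem.Set.ofList arr).flatMap (pvPos arr)).Perm (PySem.List.pyRange 0 (arr.length : Int)) := by
  rw [List.perm_iff_count]
  intro x
  rw [List.count_flatMap]
  by_cases hx : 0 ≤ x ∧ x < (arr.length : Int)
  · have hmem : x ∈ PySem.List.pyRange 0 (arr.length : Int) :=
      PySem.List.mem_pyRange_one.2 ⟨hx.1, hx.2⟩
    rw [List.count_eq_one_of_mem (PySem.List.nodup_pyRange_one _ _) hmem]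
    have harr : pvGet arr x ∈ arr := by
      rw [pvGet, PySem.List.pyGetD_eq_getElem arr 0 hx.1 hx.2]
      exact List.getElem_mem _
    have per_v : ∀ v ∈ PySem.Set.ofList arr,
        (List.count x ∘ pvPos arr) v = if (v == pvGet arr x) then 1 else 0 := by
      intro v _
      simp only [Function.comp_apply]
      by_cases hvx : v = pvGet arr x
      · subst hvx
        rw [List.count_eq_one_of_mem (nodup_pvPos arr _)
          ((mem_pvPos arr _ x).2 ⟨hx.1, hx.2, rfl⟩), if_pos (by simp)]
      · rw [List.count_eq_zero_of_not_mem, if_neg (by simpa using hvx)]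
        intro hm
        exact hvx ((mem_pvPos arr v x).1 hm).2.2.symm
    rw [List.map_congr_left per_v, pvSumIte, ← List.count_eq_countP]
    exact List.count_eq_one_of_mem (PySem.Set.nodup_ofList arr)
      ((PySem.Set.mem_ofList arr _).2 harr)
  · rw [List.count_eq_zero_of_not_mem
      (fun hmem => hx (PySem.List.mem_pyRange_one.1 hmem))]
    apply List.sum_eq_zero
    intro y hy
    simp only [List.mem_map, Function.comp_apply] at hy
    obtain ⟨v, _, rfl⟩ := hy
    apply List.count_eq_zero_of_not_mem
    intro hm
    obtain ⟨h0, hn, _⟩ := (mem_pvPos arr v x).1 hm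
    exact hx ⟨h0, hn⟩

lemma pvModShift (n p q c : Int) (hn : 0 < n) (hp : 0 ≤ p) (hpn : p < n)
    (hq : 0 ≤ q) (hqn : q < n) (hc : 0 ≤ c) (hcn : c < n) :
    PySem.Int.mod (q - p) n = c ↔ q = PySem.Int.mod (c + p) n := by
  rw [PySem.Int.mod_eq_emod_of_pos hn, PySem.Int.mod_eq_emod_of_pos hn]
  have e1 : (q - p) % n = if p ≤ q then q - p else q - p + n := by
    split
    · exact Int.emod_eq_of_lt (by omega) (by omega)
    · have h' := Int.add_mul_emod_self_left (a := q - p) (b := n) (c := 1)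
      rw [show q - p + n * 1 = q - p + n by ring] at h'
      rw [← h']
      exact Int.emod_eq_of_lt (by omega) (by omega)
  have e2 : (c + p) % n = if c + p < n then c + p else c + p - n := by
    split
    · exact Int.emod_eq_of_lt (by omega) (by omega)
    · have h' := Int.add_mul_emod_self_left (a := c + p - n) (b := n) (c := 1)
      rw [show c + p - n + n * 1 = c + p by ring] at h'
      rw [h']
      exact Int.emod_eq_of_lt (by omega) (by omega)
  rw [e1, e2]
  split_ifs <;> omega

lemma pvBump_len (L : List Int) : ∀ (m : List Int), (L.foldl pvBump m).length = m.length := by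
  induction L with
  | nil => intro m; rfl
  | cons x t ih => intro m; simp [List.foldl_cons, ih, pvBump, List.length_set]

lemma pvBump_fold (L : List Int) : ∀ (m : List Int), (∀ x ∈ L, 0 ≤ x ∧ x < (m.length : Int)) →
    ∀ (c : Int), 0 ≤ c → c < (m.length : Int) →
    (L.foldl pvBump m).getD c.toNat 0 = m.getD c.toNat 0 + (L.count c : Int) := by
  induction L with
  | nil => intro m _ c _ _; simp
  | cons x t ih =>
    intro m h c hc hcm
    have hx := h x (List.mem_cons_self)
    have hlen : (pvBump m x).length = m.length := by simp [pvBump, List.length_set]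
    simp only [List.foldl_cons]
    rw [ih (pvBump m x) (fun y hy => by rw [hlen]; exact h y (List.mem_cons_of_mem _ hy)) c hc
      (by rw [hlen]; exact hcm)]
    have hbg : (pvBump m x).getD c.toNat 0 = m.getD c.toNat 0 + if x = c then 1 else 0 := by
      unfold pvBump
      rw [PySem.List.pyGetD_eq_getElem m 0 hx.1 hx.2]
      rw [List.getD_eq_getElem?_getD, List.getElem?_set, List.getD_eq_getElem?_getD]
      by_cases hxc : x = c
      · subst hxc
        rw [if_pos (by rfl), if_pos (by omega)]
        rw [List.getElem?_eq_getElem (by omega)]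
        simp
      · rw [if_neg (by omega)]
        simp [hxc]
    rw [hbg, List.count_cons]
    by_cases hxc : x = c
    · simp [hxc]; ring
    · simp [hxc]

lemma pvCount_pvI (arr : List Int) (c : Int) (hc : 0 ≤ c) (hcn : c < (arr.length : Int)) :
    (pvI arr).count c = pvMatchCount arr c := by
  have hn : (0 : Int) < (arr.length : Int) := by omega
  unfold pvI
  rw [List.count_flatMap]
  have per_v : ∀ v ∈ PySem.Set.ofList arr,
      (List.count c ∘ fun v => (pvPos arr v).flatMap (fun p =>
        (pvPos arr v).map (fun q => PySem.Int.mod (q - p) (arr.length : Int)))) v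
      = (pvPos arr v).countP
          (fun p => pvGet arr (PySem.Int.mod (c + p) (arr.length : Int)) == pvGet arr p) := by
    intro v hv
    simp only [Function.comp_apply]
    rw [List.count_flatMap]
    have per_p : ∀ p ∈ pvPos arr v,
        (List.count c ∘ fun p => (pvPos arr v).map (fun q => PySem.Int.mod (q - p) (arr.length : Int))) p
        = if pvGet arr (PySem.Int.mod (c + p) (arr.length : Int)) == pvGet arr p then 1 else 0 := by
      intro p hp
      obtain ⟨hp0, hpn, hpv⟩ := (mem_pvPos arr v p).1 hp
      simp only [Function.comp_apply]
      rw [List.count_eq_countP, List.countP_map]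
      have hcong : ∀ q ∈ pvPos arr v,
          (((fun x => x == c) ∘ fun q => PySem.Int.mod (q - p) (arr.length : Int)) q = true)
          ↔ ((fun q => q == PySem.Int.mod (c + p) (arr.length : Int)) q = true) := by
        intro q hq
        obtain ⟨hq0, hqn, _⟩ := (mem_pvPos arr v q).1 hq
        simp only [Function.comp_apply, beq_iff_eq]
        exact pvModShift (arr.length : Int) p q c hn hp0 hpn hq0 hqn hc hcn
      rw [List.countP_congr hcong, ← List.count_eq_countP]
      by_cases hmem : pvGet arr (PySem.Int.mod (c + p) (arr.length : Int)) = v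
      · rw [List.count_eq_one_of_mem (nodup_pvPos arr v)
          ((mem_pvPos arr v _).2 ⟨PySem.Int.mod_nonneg _ hn, PySem.Int.mod_lt _ hn, hmem⟩)]
        rw [if_pos (by rw [beq_iff_eq, hmem, hpv])]
      · rw [List.count_eq_zero_of_not_mem
          (fun hm => hmem ((mem_pvPos arr v _).1 hm).2.2)]
        rw [if_neg (by rw [beq_iff_eq, hpv]; exact hmem)]
    rw [List.map_congr_left per_p, pvSumIte]
  rw [List.map_congr_left per_v]
  have hflat : ((PySem.Set.ofList arr).map (fun v => (pvPos arr v).countP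
      (fun p => pvGet arr (PySem.Int.mod (c + p) (arr.length : Int)) == pvGet arr p))).sum
      = ((PySem.Set.ofList arr).flatMap (pvPos arr)).countP
          (fun p => pvGet arr (PySem.Int.mod (c + p) (arr.length : Int)) == pvGet arr p) := by
    rw [List.countP_flatMap]
    rfl
  rw [hflat, (perm_pvPos arr).countP_eq, PySem.List.pyRange_zero_natCast, List.countP_map]
  simp only [pvMatchCount, Function.comp_def]

lemma pvI_bounds (arr : List Int) (h : 0 < arr.length) :
    ∀ x ∈ pvI arr, 0 ≤ x ∧ x < (arr.length : Int) := by
  intro x hx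
  simp only [pvI, List.mem_flatMap, List.mem_map] at hx
  obtain ⟨v, _, p, _, q, _, rfl⟩ := hx
  have hn : (0 : Int) < (arr.length : Int) := by omega
  exact ⟨PySem.Int.mod_nonneg _ hn, PySem.Int.mod_lt _ hn⟩

lemma pvInnerA (arr : List Int) (i : Int) (m : Nat) :
    ((List.range m).map (fun k : Nat => i + (k : Int))).foldl
      (fun (st : Int × Int) j =>
        (if PySem.List.pyGetD arr (PySem.Int.mod j (arr.length : Int)) 0 ≠ PySem.List.pyGetD arr st.2 0
         then st.1 + 1 else st.1, st.2 + 1))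
      (0, 0)
    = ((((List.range m).countP
          (fun (t : Nat) => decide (pvGet arr (PySem.Int.mod (i + (t : Int)) (arr.length : Int)) ≠ pvGet arr (t : Int))) : Nat) : Int),
       (m : Int)) := by
  induction m with
  | zero => simp
  | succ m ih =>
    rw [List.range_succ, List.map_append, List.foldl_append, ih, List.countP_append]
    simp only [List.map_cons, List.map_nil, List.foldl_cons, List.foldl_nil,
      List.countP_cons, List.countP_nil, pvGet]
    rw [Prod.mk.injEq]
    refine ⟨?_, by push_cast; ring⟩
    by_cases hp : PySem.List.pyGetD arr (PySem.Int.mod (i + ((m : Nat) : Int)) (arr.length : Int)) 0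
        = PySem.List.pyGetD arr ((m : Nat) : Int) 0
    · rw [if_neg (by simpa using hp), if_neg (by simpa using hp)]
      simp
    · rw [if_pos hp, if_pos (by simpa using hp)]
      push_cast; ring

lemma pvMain (arr : List Int) : getMaxHammingDistance arr = getMaxHammingDistance_alt arr := by
  simp only [getMaxHammingDistance, getMaxHammingDistance_alt]
  by_cases hle : (arr.length : Int) ≤ 1
  · rw [if_pos hle, PySem.List.pyRange_one_eq_nil hle]
    rfl
  · rw [if_neg hle]
    have hN : 0 < arr.length := by omega
    rw [pvValues arr]
    have hfold : ((PySem.Set.ofList arr).map (pvPos arr)).foldl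
        (fun m ps => ps.foldl (fun m p =>
          ps.foldl (fun m q => pvBump m (PySem.Int.mod (q - p) (arr.length : Int))) m) m)
        (List.replicate arr.length 0)
        = (pvI arr).foldl pvBump (List.replicate arr.length 0) := by
      simp only [pvI, List.foldl_flatMap, List.foldl_map]
    rw [hfold]
    apply PySem.List.foldl_congr_mem
    intro acc i hi
    obtain ⟨hi1, hin⟩ := PySem.List.mem_pyRange_one.1 hi
    have hr : PySem.List.pyRange i (i + (arr.length : Int))
        = (List.range arr.length).map (fun k : Nat => i + (k : Int)) := by
      rw [PySem.List.pyRange_one, show (i + (arr.length : Int) - i).toNat = arr.length by omega]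
    rw [hr, pvInnerA arr i arr.length]
    have hlen : ((pvI arr).foldl pvBump (List.replicate arr.length 0)).length = arr.length := by
      rw [pvBump_len]; simp
    have hget : PySem.List.pyGetD ((pvI arr).foldl pvBump (List.replicate arr.length 0)) i 0
        = ((pvI arr).foldl pvBump (List.replicate arr.length 0)).getD i.toNat 0 := by
      rw [PySem.List.pyGetD_eq_getElem _ 0 (by omega) (by rw [hlen]; omega)]
      rw [List.getD_eq_getElem _ 0 (by rw [hlen]; omega)]
    rw [hget, pvBump_fold (pvI arr) (List.replicate arr.length 0)
      (by simpa using pvI_bounds arr hN) i (by omega) (by simp; omega)]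
    rw [List.getD_replicate 0 (by omega), pvCount_pvI arr i (by omega) hin]
    congr 1
    have hsplit := List.length_eq_countP_add_countP
      (p := fun (t : Nat) => pvGet arr (PySem.Int.mod (i + (t : Int)) (arr.length : Int)) == pvGet arr (t : Int))
      (l := List.range arr.length)
    simp only [List.length_range] at hsplit
    have hpred : (List.range arr.length).countP
        (fun (t : Nat) => decide (pvGet arr (PySem.Int.mod (i + (t : Int)) (arr.length : Int)) ≠ pvGet arr (t : Int)))
        = (List.range arr.length).countP
          (fun (t : Nat) => decide ¬((pvGet arr (PySem.Int.mod (i + (t : Int)) (arr.length : Int)) == pvGet arr (t : Int)) = true)) := by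
      apply List.countP_congr
      intro t _
      simp
    rw [hpred]
    unfold pvMatchCount
    omega

-- ===== VERDICT (by name: the statement is the Claim_ definition above) =====
theorem getMaxHammingDistance_spec : Claim_equal_getMaxHammingDistance := by
  intro arr _
  unfold Spec_getMaxHammingDistance
  exact pvMain arr
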